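-- pv_equiv track=rewrite | github.com/bhasinn01/Dino_Game | 23-Exam3-202110/src/problem2.py | problem2a
-- ===== SOURCE A (Python) =====
-- def problem2a(seq_seq, word):
--     """
--     What comes in:
--       -- A sequence of sequences of words
--       -- A word we are looking for
--
--     What goes out:
--       -- The number of times the given word to look for appears in the entire
--           sequence of sequences.
--
--     Side effects:
--       -- MUTATES the given sequence of sequences by replacing every
--           occurrence of the word we are looking for with "Found IT!"
--
--     Examples:
--
--       seq_seq = [['hello', 'world'], ['hi', 'hello'], [], ['hello', 'hola']]
--       count = problem2a(seq_seq, 'hello')  # count becomes 3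
--       # after the call to problem2a, seq_seq becomes
--       # [['Found IT!', 'world'], ['hi', 'Found IT!'], [], ['Found IT!', 'hola']]
--
--       seq_seq = [[]]
--       count = problem2a(seq_seq, 'a') # count becomes 0
--       # after the call, seq_seq is unchanged
--
--       seq_seq = [['abc', 'happy'], ['world', 'peace', 'yes'], ['no', 'war']]
--       count = problem2a(seq_seq, 'sad') # count becomes 0
--       # after the call, seq_seq is unchanged
--
--
--                 ** ASK YOUR INSTRUCTOR FOR HELP **
--         ** IF YOU DO NOT UNDERSTAND THE ABOVE SPECIFICATION. **
--
--     Type hints: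
--       :type seq_seq: list[list[str]]
--       :type word: str
--       :rtype: int
--     """
--     # -----------------------------------------------------------------
--     # DONE: 2. Implement and test this function.
--     #     The testing code is already written for you (above).
--     # -----------------------------------------------------------------
--     count = 0
--     for k in range(len(seq_seq)):
--         seq = seq_seq[k]
--         for j in range(len(seq)):
--             if seq[j] == word:
--                 count = count + 1
--                 seq[j] = "Found IT!"
--     return count
-- ===== SOURCE B (Python) =====
-- def problem2a(seq_seq, word):
--     # Two separate passes: count with the library, then replace in place.
--     # Performs the same in-place mutation as A (slice assignment).
--     count = sum(seq.count(word) for seq in seq_seq)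
--     for seq in seq_seq:
--         seq[:] = ["Found IT!" if w == word else w for w in seq]
--     return count
-- ===== Notes on version B (the rewrite author's own statement) =====
-- stated objective: simpler
-- what changed: A interleaves counting and replacement in one nested index loop; B splits it into a library-count pass (sum of seq.count) followed by a separate slice-assignment replacement pass.
import Mathlib
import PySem

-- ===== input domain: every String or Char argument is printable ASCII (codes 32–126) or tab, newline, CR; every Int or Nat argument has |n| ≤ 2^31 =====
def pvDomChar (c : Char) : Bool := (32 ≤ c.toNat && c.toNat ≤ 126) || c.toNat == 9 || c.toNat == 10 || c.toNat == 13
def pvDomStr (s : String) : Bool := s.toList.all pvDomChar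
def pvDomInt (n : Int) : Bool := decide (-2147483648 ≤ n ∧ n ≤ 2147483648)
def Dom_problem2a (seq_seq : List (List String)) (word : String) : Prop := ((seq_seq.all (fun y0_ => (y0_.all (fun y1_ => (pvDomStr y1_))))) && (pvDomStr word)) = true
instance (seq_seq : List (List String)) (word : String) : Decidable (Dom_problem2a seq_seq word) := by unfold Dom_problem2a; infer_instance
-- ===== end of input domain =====

-- ===== PORT A =====
-- Equivalence is about the RETURN value only: both Pythons also mutate seq_seq in place
-- (A by element assignment, B by slice assignment), identically; the ports model the count.
-- A: nested index loops, incrementing count when an element equals word (and mutating it).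
def problem2a (seq_seq : List (List String)) (word : String) : Int :=
  seq_seq.foldl (fun count seq =>
    seq.foldl (fun c w => if w == word then c + 1 else c) count) 0

-- ===== PORT B =====
-- B: count = sum(seq.count(word) for seq in seq_seq); the replacement pass does not
-- affect the return value.
def problem2a_alt (seq_seq : List (List String)) (word : String) : Int :=
  (seq_seq.map (fun seq => (PySem.List.count seq word : Int))).sum

-- ===== PRECONDITION & SPEC =====
def Spec_problem2a (seq_seq : List (List String)) (word : String) (out : Int) : Prop := out = problem2a_alt seq_seq word
instance (seq_seq : List (List String)) (word : String) (out : Int) : Decidable (Spec_problem2a seq_seq word out) := by unfold Spec_problem2a; infer_instance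

-- ===== CLAIM (what is proved, stated in full; the proofs are below) =====
def Claim_equal_problem2a : Prop := ∀ (seq_seq : List (List String)) (word : String), Dom_problem2a seq_seq word → Spec_problem2a seq_seq word (problem2a seq_seq word)

-- ===== LEMMAS AND PROOFS =====

-- ===== VERDICT (by name: the statement is the Claim_ definition above) =====
theorem problem2a_spec : Claim_equal_problem2a := by
  intro seq_seq word hd
  clear hd
  unfold Spec_problem2a problem2a problem2a_alt
  induction seq_seq using List.reverseRecOn with
  | nil => rfl
  | append_singleton xs x ih =>
      rw [List.foldl_append, List.map_append, List.sum_append, ← ih,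
        List.foldl_cons, List.foldl_nil, List.map_cons, List.map_nil, List.sum_cons,
        List.sum_nil, PySem.List.foldl_beq_add_one]
      simp [PySem.List.count]
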